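-- pv_equiv track=rewrite | github.com/eliottcassidy2000/math | 04-computation/q_x_divisibility.py | adj_matrix_bits
-- ===== SOURCE A (Python) =====
-- def adj_matrix_bits(bits, n):
--     A = [[0]*n for _ in range(n)]
--     idx = 0
--     for i in range(n):
--         for j in range(i+1, n):
--             if (bits >> idx) & 1: A[i][j] = 1
--             else: A[j][i] = 1
--             idx += 1
--     return A
-- ===== SOURCE B (Python) =====
-- def adj_matrix_bits(bits, n):
--     # Row i's upper-triangle bits occupy the contiguous bit range starting at
--     # i*n - i*(i+1)//2, so extract each row's bits directly in closed form and
--     # assemble every row as mirrored-lower + diagonal zero + own upper bits.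
--     U = []
--     for i in range(n):
--         seg = bits >> (i * n - i * (i + 1) // 2)
--         U.append([(seg >> t) & 1 for t in range(n - i - 1)])
--     return [[1 - U[j][i - j - 1] for j in range(i)] + [0] + U[i] for i in range(n)]
-- ===== Notes on version B (the rewrite author's own statement) =====
-- stated objective: alternative
-- what changed: Instead of one mutable matrix updated under a running bit counter, B computes each row's upper-triangle bits directly from the closed-form bit offset i*n - i*(i+1)//2 and assembles every row as mirrored-lower-part + diagonal zero + own upper bits, with no in-place updates and no threaded counter.
import Mathlib
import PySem

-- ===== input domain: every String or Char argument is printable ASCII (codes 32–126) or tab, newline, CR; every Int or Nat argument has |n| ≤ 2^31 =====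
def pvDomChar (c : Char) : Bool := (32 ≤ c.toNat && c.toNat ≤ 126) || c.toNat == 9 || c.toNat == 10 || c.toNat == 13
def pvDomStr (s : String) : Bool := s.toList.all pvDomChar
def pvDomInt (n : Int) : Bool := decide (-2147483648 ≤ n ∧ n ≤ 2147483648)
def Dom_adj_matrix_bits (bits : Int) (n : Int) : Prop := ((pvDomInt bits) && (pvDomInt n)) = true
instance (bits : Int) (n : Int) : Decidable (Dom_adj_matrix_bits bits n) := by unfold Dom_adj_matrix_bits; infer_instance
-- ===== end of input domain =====

-- B replaces A's in-place updates and running bit counter with a pure nested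
-- comprehension computing each cell from the closed-form bit position (alternative, same cost).

-- ===== PORT A =====
-- A[i][j] = v  (i, j always in range here)
def pvSetCell (M : List (List Int)) (i j : Nat) (v : Int) : List (List Int) :=
  M.set i ((M.getD i []).set j v)

def adj_matrix_bits (bits : Int) (n : Int) : List (List Int) :=
  (((List.range n.toNat).foldl (fun (st : List (List Int) × Nat) i =>
      (List.range' (i + 1) (n.toNat - (i + 1))).foldl (fun st2 j =>
        if PySem.Int.band (bits >>> st2.2) 1 = 1 then (pvSetCell st2.1 i j 1, st2.2 + 1)
        else (pvSetCell st2.1 j i 1, st2.2 + 1)) st)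
    (List.replicate n.toNat (List.replicate n.toNat (0 : Int)), 0)).1)

-- ===== PORT B =====
-- closed-form start of row i's upper-triangle bit range; used only with i < n,
-- where Nat subtraction and division agree exactly with Python's int arithmetic
def pvStart (n : Int) (i : Nat) : Nat := i * n.toNat - i * (i + 1) / 2

-- row i's upper-triangle bits: [(seg >> t) & 1 for t in range(n - i - 1)]
def pvUpper (bits : Int) (n : Int) (i : Nat) : List Int :=
  (List.range (n.toNat - i - 1)).map (fun (t : Nat) =>
    PySem.Int.band ((bits >>> pvStart n i) >>> t) 1)

-- U = the list built by B's first loop (indexing is always in range in B)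
def pvU (bits : Int) (n : Int) : List (List Int) :=
  (List.range n.toNat).map (fun i => pvUpper bits n i)

def adj_matrix_bits_alt (bits : Int) (n : Int) : List (List Int) :=
  (List.range n.toNat).map (fun i =>
    ((List.range i).map (fun j => 1 - ((pvU bits n).getD j []).getD (i - j - 1) 0))
      ++ [0] ++ (pvU bits n).getD i [])

-- ===== CLAIM (what is proved, stated in full; the proofs are below) =====
def Spec_adj_matrix_bits (bits : Int) (n : Int) (out : List (List Int)) : Prop := out = adj_matrix_bits_alt bits n
instance (bits : Int) (n : Int) (out : List (List Int)) : Decidable (Spec_adj_matrix_bits bits n out) := by unfold Spec_adj_matrix_bits; infer_instance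

def Claim_equal_adj_matrix_bits : Prop := ∀ (bits : Int) (n : Int), Dom_adj_matrix_bits bits n → Spec_adj_matrix_bits bits n (adj_matrix_bits bits n)

-- ===== LEMMAS AND PROOFS =====

-- the bit value Python's `(bits >> k) & 1` yields
def pvBit (bits : Int) (k : Nat) : Int := PySem.Int.band (bits >>> k) 1

lemma pvBit_dichotomy (bits : Int) (k : Nat) : pvBit bits k = 0 ∨ pvBit bits k = 1 := by
  unfold pvBit
  rw [PySem.Int.band_one]
  have h0 := PySem.Int.mod_nonneg (bits >>> k) (b := 2) (by omega)
  have h1 := PySem.Int.mod_lt (bits >>> k) (b := 2) (by omega)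
  omega

-- matrix given by an entry function
def pvMk (n' : Nat) (h : Nat → Nat → Int) : List (List Int) :=
  (List.range n').map fun a => (List.range n').map fun b => h a b

lemma pvMk_congr {n' : Nat} {f g : Nat → Nat → Int}
    (h : ∀ a < n', ∀ b < n', f a b = g a b) : pvMk n' f = pvMk n' g := by
  unfold pvMk
  refine List.map_congr_left (fun a ha => ?_)
  refine List.map_congr_left (fun b hb => ?_)
  exact h a (List.mem_range.mp ha) b (List.mem_range.mp hb)

lemma pvMk_zero (n' : Nat) :
    List.replicate n' (List.replicate n' (0 : Int)) = pvMk n' (fun _ _ => 0) := by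
  unfold pvMk
  apply List.ext_getElem <;> simp

lemma pvSetMapRange {α : Type} (n' : Nat) (f : Nat → α) (i : Nat) (v : α) :
    ((List.range n').map f).set i v = (List.range n').map (fun a => if a = i then v else f a) := by
  apply List.ext_getElem
  · simp
  · intro a ha ha'
    simp only [List.length_map, List.length_range, List.length_set] at ha ha'
    simp only [List.getElem_set, List.getElem_map, List.getElem_range]
    split_ifs <;> first | rfl | omega

lemma pvSetCell_mk {n' : Nat} {i j : Nat} (hi : i < n') (h : Nat → Nat → Int)
    (v : Int) :
    pvSetCell (pvMk n' h) i j v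
      = pvMk n' (fun a b => if a = i ∧ b = j then v else h a b) := by
  unfold pvSetCell pvMk
  rw [List.getD_eq_getElem _ _ (by simp [hi])]
  simp only [List.getElem_map, List.getElem_range]
  rw [pvSetMapRange, pvSetMapRange]
  refine List.map_congr_left (fun a _ => ?_)
  by_cases hai : a = i
  · subst hai
    rw [if_pos rfl]
    refine List.map_congr_left (fun b _ => ?_)
    simp
  · simp [hai]

lemma pvInner (bits : Int) (n' i : Nat) :
    ∀ (m t c : Nat) (h : Nat → Nat → Int), i < t → t + m ≤ n' →
    (List.range' t m).foldl (fun (st2 : List (List Int) × Nat) j =>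
        if PySem.Int.band (bits >>> st2.2) 1 = 1 then (pvSetCell st2.1 i j 1, st2.2 + 1)
        else (pvSetCell st2.1 j i 1, st2.2 + 1)) (pvMk n' h, c)
    = (pvMk n' (fun a b =>
        if a = i ∧ t ≤ b ∧ b < t + m then (if pvBit bits (c + (b - t)) = 1 then 1 else h a b)
        else if b = i ∧ t ≤ a ∧ a < t + m then (if pvBit bits (c + (a - t)) = 1 then h a b else 1)
        else h a b), c + m) := by
  intro m
  induction m with
  | zero =>
    intro t c h hit htm
    simp only [List.range'_zero, List.foldl_nil, Nat.add_zero]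
    refine Prod.ext ?_ rfl
    apply pvMk_congr; intro a _ b _
    split_ifs with h1 h2 <;> first | rfl | omega
  | succ m ih =>
    intro t c h hit htm
    have hin : i < n' := by omega
    have htn : t < n' := by omega
    rw [List.range'_succ, List.foldl_cons]
    rcases pvBit_dichotomy bits c with hc | hc
    · have hne : ¬ (PySem.Int.band (bits >>> c) 1 = 1) := by unfold pvBit at hc; omega
      simp only [hne, if_false]
      rw [pvSetCell_mk htn h 1]
      rw [ih (t + 1) (c + 1) _ (by omega) (by omega)]
      refine Prod.ext ?_ (by omega)
      apply pvMk_congr; intro a _ b _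
      dsimp only
      by_cases h1 : a = i ∧ t + 1 ≤ b ∧ b < t + 1 + m
      · rw [if_pos h1, show c + 1 + (b - (t + 1)) = c + (b - t) from by omega,
            if_pos (show a = i ∧ t ≤ b ∧ b < t + (m + 1) from by omega),
            if_neg (show ¬(a = t ∧ b = i) from by omega)]
      · by_cases h2 : b = i ∧ t + 1 ≤ a ∧ a < t + 1 + m
        · rw [if_neg h1, if_pos h2, show c + 1 + (a - (t + 1)) = c + (a - t) from by omega,
              if_neg (show ¬(a = i ∧ t ≤ b ∧ b < t + (m + 1)) from by omega),
              if_pos (show b = i ∧ t ≤ a ∧ a < t + (m + 1) from by omega),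
              if_neg (show ¬(a = t ∧ b = i) from by omega)]
        · rw [if_neg h1, if_neg h2]
          by_cases h3 : a = i ∧ t ≤ b ∧ b < t + (m + 1)
          · rw [if_pos h3, show c + (b - t) = c from by omega,
                if_neg (show ¬ pvBit bits c = 1 from by omega),
                if_neg (show ¬(a = t ∧ b = i) from by omega)]
          · by_cases h4 : b = i ∧ t ≤ a ∧ a < t + (m + 1)
            · rw [if_neg h3, if_pos h4, show c + (a - t) = c from by omega,
                  if_neg (show ¬ pvBit bits c = 1 from by omega),
                  if_pos (show a = t ∧ b = i from by omega)]
            · rw [if_neg h3, if_neg h4, if_neg (show ¬(a = t ∧ b = i) from by omega)]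
    · have heq : PySem.Int.band (bits >>> c) 1 = 1 := hc
      simp only [heq, if_true]
      rw [pvSetCell_mk hin h 1]
      rw [ih (t + 1) (c + 1) _ (by omega) (by omega)]
      refine Prod.ext ?_ (by omega)
      apply pvMk_congr; intro a _ b _
      dsimp only
      by_cases h1 : a = i ∧ t + 1 ≤ b ∧ b < t + 1 + m
      · rw [if_pos h1, show c + 1 + (b - (t + 1)) = c + (b - t) from by omega,
            if_pos (show a = i ∧ t ≤ b ∧ b < t + (m + 1) from by omega),
            if_neg (show ¬(a = i ∧ b = t) from by omega)]
      · by_cases h2 : b = i ∧ t + 1 ≤ a ∧ a < t + 1 + m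
        · rw [if_neg h1, if_pos h2, show c + 1 + (a - (t + 1)) = c + (a - t) from by omega,
              if_neg (show ¬(a = i ∧ t ≤ b ∧ b < t + (m + 1)) from by omega),
              if_pos (show b = i ∧ t ≤ a ∧ a < t + (m + 1) from by omega),
              if_neg (show ¬(a = i ∧ b = t) from by omega)]
        · rw [if_neg h1, if_neg h2]
          by_cases h3 : a = i ∧ t ≤ b ∧ b < t + (m + 1)
          · rw [if_pos h3, show c + (b - t) = c from by omega,
                if_pos hc, if_pos (show a = i ∧ b = t from by omega)]
          · by_cases h4 : b = i ∧ t ≤ a ∧ a < t + (m + 1)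
            · rw [if_neg h3, if_pos h4, show c + (a - t) = c from by omega,
                  if_pos hc, if_neg (show ¬(a = i ∧ b = t) from by omega)]
            · rw [if_neg h3, if_neg h4, if_neg (show ¬(a = i ∧ b = t) from by omega)]

def pvTri (n' : Nat) : Nat → Nat
  | 0 => 0
  | k + 1 => pvTri n' k + (n' - (k + 1))

def pvF (bits : Int) (n' k : Nat) (a b : Nat) : Int :=
  if a < b ∧ a < k then pvBit bits (pvTri n' a + (b - a - 1))
  else if b < a ∧ b < k then 1 - pvBit bits (pvTri n' b + (a - b - 1))
  else 0

lemma pvOuter (bits : Int) (n' : Nat) : ∀ k, k ≤ n' →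
    (List.range k).foldl (fun (st : List (List Int) × Nat) i =>
        (List.range' (i + 1) (n' - (i + 1))).foldl (fun (st2 : List (List Int) × Nat) j =>
          if PySem.Int.band (bits >>> st2.2) 1 = 1 then (pvSetCell st2.1 i j 1, st2.2 + 1)
          else (pvSetCell st2.1 j i 1, st2.2 + 1)) st)
      (pvMk n' (fun _ _ => 0), 0)
    = (pvMk n' (pvF bits n' k), pvTri n' k) := by
  intro k
  induction k with
  | zero =>
    intro _
    refine Prod.ext ?_ rfl
    apply pvMk_congr; intro a _ b _
    simp [pvF]
  | succ k ih =>
    intro hk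
    rw [List.range_succ, List.foldl_append, ih (by omega), List.foldl_cons, List.foldl_nil]
    rw [pvInner bits n' k (n' - (k + 1)) (k + 1) (pvTri n' k) _ (by omega) (by omega)]
    refine Prod.ext ?_ rfl
    apply pvMk_congr; intro a ha b hb
    dsimp only
    by_cases h1 : a = k ∧ k + 1 ≤ b ∧ b < k + 1 + (n' - (k + 1))
    · obtain ⟨ha1, hb1, hb2⟩ := h1
      subst ha1
      rw [if_pos (⟨rfl, hb1, hb2⟩ : a = a ∧ a + 1 ≤ b ∧ b < a + 1 + (n' - (a + 1)))]
      have hF0 : pvF bits n' a a b = 0 := by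
        unfold pvF; rw [if_neg (by omega), if_neg (by omega)]
      rw [show pvTri n' a + (b - (a + 1)) = pvTri n' a + (b - a - 1) from by omega, hF0]
      unfold pvF
      rw [if_pos (show a < b ∧ a < a + 1 from by omega)]
      rcases pvBit_dichotomy bits (pvTri n' a + (b - a - 1)) with h | h <;> rw [h] <;> norm_num
    · by_cases h2 : b = k ∧ k + 1 ≤ a ∧ a < k + 1 + (n' - (k + 1))
      · obtain ⟨hb1, ha1, ha2⟩ := h2
        subst hb1
        rw [if_neg h1, if_pos (⟨rfl, ha1, ha2⟩ : b = b ∧ b + 1 ≤ a ∧ a < b + 1 + (n' - (b + 1)))]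
        have hF0 : pvF bits n' b a b = 0 := by
          unfold pvF; rw [if_neg (by omega), if_neg (by omega)]
        rw [show pvTri n' b + (a - (b + 1)) = pvTri n' b + (a - b - 1) from by omega, hF0]
        unfold pvF
        rw [if_neg (show ¬(a < b ∧ a < b + 1) from by omega),
            if_pos (show b < a ∧ b < b + 1 from by omega)]
        rcases pvBit_dichotomy bits (pvTri n' b + (a - b - 1)) with h | h <;> rw [h] <;> norm_num
      · rw [if_neg h1, if_neg h2]
        unfold pvF
        by_cases c1 : a < b ∧ a < k
        · rw [if_pos c1, if_pos (show a < b ∧ a < k + 1 from by omega)]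
        · by_cases c2 : b < a ∧ b < k
          · rw [if_neg c1, if_pos c2, if_neg (show ¬(a < b ∧ a < k + 1) from by omega),
                if_pos (show b < a ∧ b < k + 1 from by omega)]
          · rw [if_neg c1, if_neg c2, if_neg (show ¬(a < b ∧ a < k + 1) from by omega),
                if_neg (show ¬(b < a ∧ b < k + 1) from by omega)]

lemma pvTri_double (n' : Nat) : ∀ i, i ≤ n' → 2 * pvTri n' i + i * (i + 1) = 2 * (i * n') := by
  intro i
  induction i with
  | zero => intro _; simp [pvTri]
  | succ i ih =>
    intro h
    have ihh := ih (by omega)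
    show 2 * (pvTri n' i + (n' - (i + 1))) + (i + 1) * (i + 1 + 1) = 2 * ((i + 1) * n')
    rw [show (i + 1) * (i + 1 + 1) = i * (i + 1) + 2 * i + 2 from by ring,
        show (i + 1) * n' = i * n' + n' from by ring]
    generalize i * (i + 1) = q at ihh ⊢
    generalize i * n' = p at ihh ⊢
    omega

lemma pvTri_closed (n' i : Nat) (h : i ≤ n') : pvTri n' i = i * n' - i * (i + 1) / 2 := by
  have h2 := pvTri_double n' i h
  have hev : i * (i + 1) % 2 = 0 := Nat.even_iff.mp (Nat.even_mul_succ_self i)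
  generalize i * (i + 1) = q at h2 hev ⊢
  generalize i * n' = p at h2 ⊢
  omega

lemma pvU_getD (bits : Int) (n : Int) (j : Nat) (hj : j < n.toNat) :
    (pvU bits n).getD j [] = pvUpper bits n j := by
  unfold pvU
  rw [List.getD_eq_getElem _ _ (by simp [hj])]
  simp

lemma pvUpper_getD (bits : Int) (n : Int) (i t : Nat) (ht : t < n.toNat - i - 1) :
    (pvUpper bits n i).getD t 0 = PySem.Int.band (bits >>> (pvStart n i + t)) 1 := by
  unfold pvUpper
  rw [List.getD_eq_getElem _ _ (by simp [ht])]
  simp only [List.getElem_map, List.getElem_range, Int.shiftRight_add]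

lemma pvAlt_eq (bits : Int) (n : Int) :
    adj_matrix_bits_alt bits n
      = pvMk n.toNat (fun i j =>
          if i < j then PySem.Int.band (bits >>> (pvStart n i + (j - i - 1))) 1
          else if j < i then 1 - PySem.Int.band (bits >>> (pvStart n j + (i - j - 1))) 1
          else 0) := by
  unfold adj_matrix_bits_alt pvMk
  refine List.map_congr_left (fun i hi => ?_)
  have hi' : i < n.toNat := List.mem_range.mp hi
  rw [pvU_getD bits n i hi']
  apply List.ext_getElem
  · simp [pvUpper]; omega
  · intro j hj hj'
    simp only [List.length_map, List.length_range] at hj'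
    by_cases hji : j < i
    · rw [List.getElem_append_left (by simp; omega), List.getElem_append_left (by simp; omega)]
      simp only [List.getElem_map, List.getElem_range]
      rw [pvU_getD bits n j (by omega), pvUpper_getD bits n j (i - j - 1) (by omega)]
      rw [if_neg (by omega), if_pos hji]
    · by_cases hij : i < j
      · rw [List.getElem_append_right (by simp; omega)]
        simp only [List.getElem_map, List.getElem_range, List.length_append, List.length_map,
          List.length_range, List.length_cons, List.length_nil]
        unfold pvUpper
        simp only [List.getElem_map, List.getElem_range]
        rw [← Int.shiftRight_add, if_pos hij]
        congr 2
      · have hji' : j = i := by omega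
        subst hji'
        rw [List.getElem_append_left (by simp), List.getElem_append_right (by simp)]
        simp only [List.getElem_map, List.getElem_range, List.length_map, List.length_range]
        rw [if_neg (by omega), if_neg (by omega)]
        simp

-- ===== VERDICT (by name: the statement is the Claim_ definition above) =====
theorem adj_matrix_bits_spec : Claim_equal_adj_matrix_bits := by
  intro bits n _
  unfold Spec_adj_matrix_bits adj_matrix_bits
  rw [pvMk_zero, pvOuter bits n.toNat n.toNat le_rfl, pvAlt_eq]
  show pvMk n.toNat (pvF bits n.toNat n.toNat) = _
  apply pvMk_congr; intro a ha b hb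
  unfold pvF pvBit pvStart
  by_cases hab : a < b
  · rw [if_pos (⟨hab, ha⟩ : a < b ∧ a < n.toNat), if_pos hab,
        pvTri_closed n.toNat a (by omega)]
  · by_cases hba : b < a
    · rw [if_neg (by omega), if_pos (⟨hba, hb⟩ : b < a ∧ b < n.toNat), if_neg (by omega),
          if_pos hba, pvTri_closed n.toNat b (by omega)]
    · rw [if_neg (by omega), if_neg (by omega), if_neg (by omega), if_neg (by omega)]
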